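-- pv_equiv track=rewrite | github.com/oohlaf/adventofcode | 2023/day05/run.py | map_range
-- ===== SOURCE A (Python) =====
-- def overlap(r, m):
--     if r[2]:
--         # We already processed this range
--         return False
--     a_start = r[0]
--     a_end = a_start + r[1] - 1
--     b_start = m[1]
--     b_end = b_start + m[2] - 1
--     if a_end < b_start:
--         return False
--     if a_start > b_end:
--         return False
--     return True
--
-- def intersect(r, m):
--     result = []
--     a_start = r[0]
--     a_end = a_start + r[1] - 1
--     b_start = m[1]
--     b_end = b_start + m[2] - 1
--     i_start = max(a_start, b_start)
--     i_end = min(a_end, b_end)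
--     c_start = m[0]
--     length1 = 0
--     if a_start < i_start:
--         # mark range as unprocessed
--         length1 = i_start - a_start
--         result.append((a_start, length1, False))
--     length2 = i_end - i_start + 1
--     # Transform to destination range, mark range as done
--     result.append((i_start+c_start-b_start, length2, True))
--     length3 = 0
--     if a_end > i_end:
--         # mark range as unprocessed
--         length3 = a_end - i_end
--         result.append((i_end+1, length3, False))
--     assert length1 + length2 + length3 == r[1]
--     return result
--
-- def map_range(mapped_ranges, one_map):
--     result = []
--     # init all ranges as unprocessed for this map
--     for r in mapped_ranges:
--         result.append((r[0], r[1], False))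
--     for m in one_map:
--         new_result = []
--         for r in result:
--             if overlap(r, m):
--                 new_result.extend(intersect(r, m))
--             else:
--                 new_result.append(r)
--         result = new_result
--     return result
-- ===== SOURCE B (Python) =====
-- def map_range(mapped_ranges, one_map):
--     # Per-range recursive splitting: each original range is split against the
--     # map entries in order; mapped pieces are emitted immediately, leftover
--     # pieces recurse on the remaining entries. No done-flags drive control.
--     def process(s, l, i):
--         if i == len(one_map):
--             return [(s, l, False)]
--         c, b_start, blen = one_map[i]
--         a_end = s + l - 1
--         b_end = b_start + blen - 1
--         if a_end < b_start or s > b_end: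
--             return process(s, l, i + 1)
--         i_start = max(s, b_start)
--         i_end = min(a_end, b_end)
--         res = []
--         if s < i_start:
--             res += process(s, i_start - s, i + 1)
--         res.append((i_start + c - b_start, i_end - i_start + 1, True))
--         if a_end > i_end:
--             res += process(i_end + 1, a_end - i_end, i + 1)
--         return res
--     out = []
--     for s, l in mapped_ranges:
--         out += process(s, l, 0)
--     return out
-- ===== Notes on version B (the rewrite author's own statement) =====
-- stated objective: faster
-- what changed: Replaces A's outer loop over map entries that rebuilds the whole flagged piece list on every entry with a per-range recursion that splits each range against the entries once; mapped (done) pieces are emitted immediately and never revisited, so no per-entry rescan of the full list.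
import Mathlib
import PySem

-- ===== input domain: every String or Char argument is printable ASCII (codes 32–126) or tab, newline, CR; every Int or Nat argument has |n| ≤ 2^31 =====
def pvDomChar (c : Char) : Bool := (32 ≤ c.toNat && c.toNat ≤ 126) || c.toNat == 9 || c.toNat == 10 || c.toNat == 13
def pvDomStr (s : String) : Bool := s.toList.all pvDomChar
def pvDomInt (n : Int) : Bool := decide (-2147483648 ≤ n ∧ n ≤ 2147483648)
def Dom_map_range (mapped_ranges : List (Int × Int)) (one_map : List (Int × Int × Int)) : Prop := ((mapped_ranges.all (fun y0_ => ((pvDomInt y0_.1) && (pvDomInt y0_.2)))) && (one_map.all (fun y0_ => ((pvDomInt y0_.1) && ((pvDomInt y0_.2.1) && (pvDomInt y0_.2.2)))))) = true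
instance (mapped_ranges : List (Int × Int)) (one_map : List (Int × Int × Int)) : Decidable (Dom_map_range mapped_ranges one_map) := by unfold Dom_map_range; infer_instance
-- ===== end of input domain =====

-- B replaces A's rebuild-the-whole-list pass per map entry with a per-range recursion
-- over the map-entry list (alternative decomposition; equal return value proved below).

-- ===== PORT A =====
def overlapA (r : Int × Int × Bool) (m : Int × Int × Int) : Bool :=
  if r.2.2 then false
  else
    let a_start := r.1
    let a_end := a_start + r.2.1 - 1
    let b_start := m.2.1
    let b_end := b_start + m.2.2 - 1
    if a_end < b_start then false
    else if a_start > b_end then false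
    else true

-- the Python assert (length1+length2+length3 == r[1]) provably never fires when
-- overlapA holds, so it is omitted
def intersectA (r : Int × Int × Bool) (m : Int × Int × Int) : List (Int × Int × Bool) :=
  let a_start := r.1
  let a_end := a_start + r.2.1 - 1
  let b_start := m.2.1
  let b_end := b_start + m.2.2 - 1
  let i_start := max a_start b_start
  let i_end := min a_end b_end
  let c_start := m.1
  (if a_start < i_start then [(a_start, i_start - a_start, false)] else []) ++
  [(i_start + c_start - b_start, i_end - i_start + 1, true)] ++
  (if a_end > i_end then [(i_end + 1, a_end - i_end, false)] else [])

def map_range (mapped_ranges : List (Int × Int)) (one_map : List (Int × Int × Int)) : List (Int × Int × Bool) :=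
  let result := mapped_ranges.foldl (fun acc r => acc ++ [(r.1, r.2, false)]) []
  one_map.foldl
    (fun result m =>
      result.foldl
        (fun new_result r =>
          if overlapA r m then new_result ++ intersectA r m else new_result ++ [r])
        [])
    result

-- ===== PORT B =====
def processB (s l : Int) (maps : List (Int × Int × Int)) : List (Int × Int × Bool) :=
  match maps with
  | [] => [(s, l, false)]
  | m :: rest =>
    let a_end := s + l - 1
    let b_start := m.2.1
    let b_end := b_start + m.2.2 - 1
    if a_end < b_start ∨ s > b_end then processB s l rest
    else
      let i_start := max s b_start
      let i_end := min a_end b_end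
      (if s < i_start then processB s (i_start - s) rest else []) ++
      [(i_start + m.1 - b_start, i_end - i_start + 1, true)] ++
      (if a_end > i_end then processB (i_end + 1) (a_end - i_end) rest else [])

def map_range_alt (mapped_ranges : List (Int × Int)) (one_map : List (Int × Int × Int)) : List (Int × Int × Bool) :=
  mapped_ranges.foldl (fun out r => out ++ processB r.1 r.2 one_map) []

-- ===== PRECONDITION & SPEC =====
def Spec_map_range (mapped_ranges : List (Int × Int)) (one_map : List (Int × Int × Int)) (out : List (Int × Int × Bool)) : Prop := out = map_range_alt mapped_ranges one_map
instance (mapped_ranges : List (Int × Int)) (one_map : List (Int × Int × Int)) (out : List (Int × Int × Bool)) : Decidable (Spec_map_range mapped_ranges one_map out) := by unfold Spec_map_range; infer_instance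

-- ===== CLAIM (what is proved, stated in full; the proofs are below) =====
def Claim_equal_map_range : Prop := ∀ (mapped_ranges : List (Int × Int)) (one_map : List (Int × Int × Int)), Dom_map_range mapped_ranges one_map → Spec_map_range mapped_ranges one_map (map_range mapped_ranges one_map)

-- ===== LEMMAS AND PROOFS =====

-- one pass of A over a piece list is a flatMap of the per-piece step
def stepA (m : Int × Int × Int) (r : Int × Int × Bool) : List (Int × Int × Bool) :=
  if overlapA r m then intersectA r m else [r]

-- how B views a single (possibly done) piece under a list of map entries
def procPiece (maps : List (Int × Int × Int)) (r : Int × Int × Bool) : List (Int × Int × Bool) :=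
  if r.2.2 then [r] else processB r.1 r.2.1 maps

lemma foldlA_eq_flatMap (m : Int × Int × Int) (ps : List (Int × Int × Bool)) :
    ps.foldl (fun acc r => if overlapA r m then acc ++ intersectA r m else acc ++ [r]) []
      = ps.flatMap (stepA m) := by
  have h : ∀ (init : List (Int × Int × Bool)),
      ps.foldl (fun acc r => if overlapA r m then acc ++ intersectA r m else acc ++ [r]) init
        = init ++ ps.flatMap (stepA m) := by
    induction ps with
    | nil => intro init; simp
    | cons r t ih =>
      intro init
      simp only [List.foldl_cons, List.flatMap_cons, stepA]
      by_cases h : overlapA r m <;> simp [h, ih, List.append_assoc]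
  simpa using h []

-- one piece under stepA m then procPiece rest = procPiece (m :: rest)
lemma piece_step (m : Int × Int × Int) (rest : List (Int × Int × Int)) (r : Int × Int × Bool) :
    (stepA m r).flatMap (procPiece rest) = procPiece (m :: rest) r := by
  obtain ⟨s, l, d⟩ := r
  cases d with
  | true => simp [stepA, overlapA, procPiece]
  | false =>
    simp only [procPiece, stepA, overlapA, intersectA, processB]
    by_cases h1 : s + l - 1 < m.2.1
    · simp [h1, procPiece]
    · by_cases h2 : s > m.2.1 + m.2.2 - 1
      · simp [h1, h2, procPiece]
      · have hor : ¬ (s + l - 1 < m.2.1 ∨ s > m.2.1 + m.2.2 - 1) := by omega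
        simp only [h1, h2, hor]
        by_cases h3 : s < max s m.2.1 <;>
          by_cases h4 : s + l - 1 > min (s + l - 1) (m.2.1 + m.2.2 - 1) <;>
            simp [h3, h4, procPiece]

-- main invariant: A's fold over map entries = flatMap of B's per-piece recursion
lemma fold_eq_flatMap (maps : List (Int × Int × Int)) (ps : List (Int × Int × Bool)) :
    maps.foldl
      (fun result m =>
        result.foldl
          (fun new_result r =>
            if overlapA r m then new_result ++ intersectA r m else new_result ++ [r])
          [])
      ps
      = ps.flatMap (procPiece maps) := by
  induction maps generalizing ps with
  | nil =>
    simp only [List.foldl_nil]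
    induction ps with
    | nil => simp
    | cons r t ih =>
      obtain ⟨s, l, d⟩ := r
      simp only [List.flatMap_cons, ← ih]
      cases d <;> simp [procPiece, processB]
  | cons m rest ih =>
    simp only [List.foldl_cons]
    rw [foldlA_eq_flatMap, ih, List.flatMap_assoc]
    exact List.flatMap_congr (fun r _ => piece_step m rest r)

lemma init_eq (mapped_ranges : List (Int × Int)) :
    mapped_ranges.foldl (fun acc r => acc ++ [(r.1, r.2, false)]) []
      = mapped_ranges.map (fun r => (r.1, r.2, false)) := by
  have h : ∀ init, mapped_ranges.foldl (fun acc r => acc ++ [(r.1, r.2, false)]) init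
      = init ++ mapped_ranges.map (fun r => (r.1, r.2, false)) := by
    induction mapped_ranges with
    | nil => intro init; simp
    | cons r t ih => intro init; simp [ih, List.append_assoc]
  simpa using h []

lemma alt_eq_flatMap (mapped_ranges : List (Int × Int)) (one_map : List (Int × Int × Int)) :
    map_range_alt mapped_ranges one_map
      = mapped_ranges.flatMap (fun r => processB r.1 r.2 one_map) := by
  unfold map_range_alt
  have h : ∀ init, mapped_ranges.foldl (fun out r => out ++ processB r.1 r.2 one_map) init
      = init ++ mapped_ranges.flatMap (fun r => processB r.1 r.2 one_map) := by
    induction mapped_ranges with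
    | nil => intro init; simp
    | cons r t ih => intro init; simp [ih, List.append_assoc]
  simpa using h []

-- ===== VERDICT (by name: the statement is the Claim_ definition above) =====
theorem map_range_spec : Claim_equal_map_range := by
  intro mapped_ranges one_map _
  unfold Spec_map_range map_range
  rw [init_eq, fold_eq_flatMap, alt_eq_flatMap, List.flatMap_map]
  rfl
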